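-- pv_equiv track=rewrite | github.com/darrencheng0817/AlgorithmLearning | Python/hackerrank/Algorithms/Dynamic_Programming/The_Maximum_Subarray.py | getMaxSubarray
-- ===== SOURCE A (Python) =====
-- def getMaxSubarray(nums):
--     res1,res2=0,0
--     local=0
--     maxNum=max(nums)
--     if maxNum<0:
--         return [maxNum,maxNum]
--     for num in nums:
--         local+=num
--         if local<0:
--             local=0
--         res1=max(res1,local)
--         if num>0:
--             res2+=num
--     return [res1,res2]
-- ===== SOURCE B (Python) =====
-- def getMaxSubarray(nums):
--     maxNum = max(nums)
--     if maxNum < 0: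
--         return [maxNum, maxNum]
--     res1 = 0
--     pre = 0
--     mn = 0
--     for num in nums:
--         pre += num
--         mn = min(mn, pre)
--         res1 = max(res1, pre - mn)
--     res2 = sum(x for x in nums if x > 0)
--     return [res1, res2]
-- ===== Notes on version B (the rewrite author's own statement) =====
-- stated objective: alternative
-- what changed: Replaces Kadane's reset-to-zero local accumulator with the prefix-sum-minus-running-minimum-prefix formulation (min/max over prefix sums), and computes the positive-element sum in a separate filter-and-sum pass instead of inside the same loop.
import Mathlib
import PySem

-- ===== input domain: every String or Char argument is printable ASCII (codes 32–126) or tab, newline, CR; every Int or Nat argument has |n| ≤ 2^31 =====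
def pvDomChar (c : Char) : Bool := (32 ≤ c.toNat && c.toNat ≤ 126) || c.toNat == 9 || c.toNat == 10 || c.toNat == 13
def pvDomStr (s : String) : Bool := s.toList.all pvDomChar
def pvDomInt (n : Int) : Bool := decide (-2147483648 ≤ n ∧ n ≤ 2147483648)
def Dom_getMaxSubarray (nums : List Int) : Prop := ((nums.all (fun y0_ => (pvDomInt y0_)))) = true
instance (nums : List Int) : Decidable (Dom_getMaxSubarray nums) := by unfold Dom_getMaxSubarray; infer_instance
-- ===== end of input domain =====

-- B replaces Kadane's reset-to-zero accumulator by the min/max-over-prefix-sums formulation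
-- and sums the positive elements in a separate filter-and-sum pass (objective: alternative decomposition).


-- ===== PORT A =====
-- Kadane step, one loop iteration of A: state = (res1, res2, local)
def stepA (st : Int × Int × Int) (num : Int) : Int × Int × Int :=
  let loc := st.2.2 + num
  let loc := if loc < 0 then 0 else loc
  let res1 := max st.1 loc
  let res2 := if num > 0 then st.2.1 + num else st.2.1
  (res1, res2, loc)

def getMaxSubarray (nums : List Int) : List Int :=
  match PySem.List.max? nums (fun x => x) with
  | none => []  -- unreachable under Pre_ (Python raises ValueError on empty list)
  | some maxNum =>
    if maxNum < 0 then [maxNum, maxNum]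
    else
      let s := nums.foldl stepA (0, 0, 0)
      [s.1, s.2.1]

-- ===== PORT B =====
-- B's loop as structural recursion: carries pre (running prefix sum), mn (min prefix), res1 (best)
def altLoop : List Int → Int → Int → Int → Int
  | [], _, _, res1 => res1
  | num :: rest, pre, mn, res1 =>
      let pre' := pre + num
      let mn' := min mn pre'
      altLoop rest pre' mn' (max res1 (pre' - mn'))

def getMaxSubarray_alt (nums : List Int) : List Int :=
  match PySem.List.max? nums (fun x => x) with
  | none => []  -- unreachable under Pre_ (Python raises ValueError on empty list)
  | some maxNum =>
    if maxNum < 0 then [maxNum, maxNum]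
    else [altLoop nums 0 0 0, (nums.filter (fun x => 0 < x)).sum]

-- ===== PRECONDITION & SPEC =====
-- Pre_ excludes only the empty list, on which Python's max() raises ValueError in both A and B.
def Pre_getMaxSubarray (nums : List Int) : Prop := nums ≠ []
instance (nums : List Int) : Decidable (Pre_getMaxSubarray nums) := by unfold Pre_getMaxSubarray; infer_instance
def pvWitness_getMaxSubarray : List Int := [1, -2, 3]

def Spec_getMaxSubarray (nums : List Int) (out : List Int) : Prop := out = getMaxSubarray_alt nums
instance (nums : List Int) (out : List Int) : Decidable (Spec_getMaxSubarray nums out) := by unfold Spec_getMaxSubarray; infer_instance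

-- ===== CLAIM (what is proved, stated in full; the proofs are below) =====
def Claim_equal_getMaxSubarray : Prop := ∀ (nums : List Int), Dom_getMaxSubarray nums → Pre_getMaxSubarray nums → Spec_getMaxSubarray nums (getMaxSubarray nums)

-- ===== LEMMAS AND PROOFS =====

-- Loop invariant: A's Kadane state started at local = p - mp tracks B's prefix/min-prefix state,
-- and A's res2 accumulator tracks the filter-and-sum of positives.
theorem loop_link : ∀ (l : List Int) (r1 r2 p mp : Int),
    (l.foldl stepA (r1, r2, p - mp)).1 = altLoop l p mp r1 ∧
    (l.foldl stepA (r1, r2, p - mp)).2.1 = r2 + (l.filter (fun x => 0 < x)).sum := by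
  intro l
  induction l with
  | nil => intro r1 r2 p mp; simp [altLoop]
  | cons x t ih =>
    intro r1 r2 p mp
    simp only [List.foldl_cons, stepA, altLoop, List.filter_cons]
    by_cases h : p - mp + x < 0
    · have h1 : p + x < mp := by omega
      have e1 : (if p - mp + x < 0 then (0:Int) else p - mp + x) = (p + x) - min mp (p + x) := by
        rw [min_eq_right (by omega : p + x ≤ mp)]; simp [h]
      rw [e1]
      have := ih (max r1 ((p + x) - min mp (p + x)))
                 (if x > 0 then r2 + x else r2) (p + x) (min mp (p + x))
      refine ⟨this.1, ?_⟩
      rw [this.2]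
      by_cases hx : 0 < x
      · simp [hx]; ring
      · simp [hx]
    · have e1 : (if p - mp + x < 0 then (0:Int) else p - mp + x) = (p + x) - min mp (p + x) := by
        rw [min_eq_left (by omega : mp ≤ p + x)]; rw [if_neg h]; ring
      rw [e1]
      have := ih (max r1 ((p + x) - min mp (p + x)))
                 (if x > 0 then r2 + x else r2) (p + x) (min mp (p + x))
      refine ⟨this.1, ?_⟩
      rw [this.2]
      by_cases hx : 0 < x
      · simp [hx]; ring
      · simp [hx]

-- ===== VERDICT (by name: the statement is the Claim_ definition above) =====
theorem getMaxSubarray_spec : Claim_equal_getMaxSubarray := by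
  intro nums _ _
  unfold Spec_getMaxSubarray getMaxSubarray getMaxSubarray_alt
  cases hm : PySem.List.max? nums (fun x => x) with
  | none => rfl
  | some maxNum =>
    by_cases hneg : maxNum < 0
    · simp [hneg]
    · simp only [hneg, if_false]
      have := loop_link nums 0 0 0 0
      norm_num at this
      rw [this.1, this.2]
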